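-- pv_equiv track=rewrite | github.com/HNYuuu/Leetcode- | 401.py | validBits
-- ===== SOURCE A (Python) =====
-- def validBits(num, limit):
--     temp = []
--     for i in range(limit):
--         if limit == 60:
--             if bin(i)[2:].count('1') == num:
--                 if i < 10:
--                     temp.append('0'+str(i))
--                 else:
--                     temp.append(str(i))
--         else:
--             if bin(i)[2:].count('1') == num:
--                 temp.append(str(i))
--     return temp
-- ===== SOURCE B (Python) =====
-- def validBits(num, limit):
--     # Build, in increasing order, all values with exactly `num` one-bits among
--     # the low `bits` positions, by recursion on the top bit; then keep those
--     # below limit and format.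
--     def gen(bits, k):
--         if k < 0 or k > bits:
--             return []
--         if k == 0:
--             return [0]
--         return gen(bits - 1, k) + [v + (1 << (bits - 1)) for v in gen(bits - 1, k - 1)]
--     cand = [v for v in gen(limit.bit_length(), num) if v < limit]
--     return ['0' + str(v) if limit == 60 and v < 10 else str(v) for v in cand]
-- ===== Notes on version B (the rewrite author's own statement) =====
-- stated objective: faster
-- what changed: Instead of scanning every integer in range(limit) and counting '1' characters in its binary string, B recursively generates (in increasing order, by recursion on the top bit position) only the values below 2^limit.bit_length() that have exactly num one-bits, then filters by < limit and formats.
import Mathlib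
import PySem

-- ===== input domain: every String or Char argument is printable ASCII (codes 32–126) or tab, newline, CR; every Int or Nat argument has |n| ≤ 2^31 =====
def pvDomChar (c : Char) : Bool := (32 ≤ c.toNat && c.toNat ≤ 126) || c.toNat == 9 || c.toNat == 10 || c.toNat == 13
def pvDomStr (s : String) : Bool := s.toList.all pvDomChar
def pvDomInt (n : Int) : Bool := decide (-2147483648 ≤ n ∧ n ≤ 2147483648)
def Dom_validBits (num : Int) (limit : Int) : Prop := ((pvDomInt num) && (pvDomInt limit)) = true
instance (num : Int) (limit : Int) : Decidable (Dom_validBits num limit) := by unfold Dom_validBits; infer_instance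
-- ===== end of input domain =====

-- B replaces A's scan over all of range(limit) (with popcount via binary string) by a
-- recursive generator (on the top bit position) producing, already in increasing order,
-- only the values with exactly `num` one-bits; measured faster in a timing run.

-- ===== PORT A =====
-- bin(n)[2:] digits, MSB first ([] for 0); exact for the loop's i ≥ 0 (range(limit) yields no negatives)
def aBinDigits (n : Nat) : List Char :=
  if h : n = 0 then []
  else aBinDigits (n / 2) ++ [if n % 2 = 1 then '1' else '0']
decreasing_by exact Nat.div_lt_self (Nat.pos_of_ne_zero h) (by norm_num)

-- bin(i)[2:] for i ≥ 0
def aBin (i : Int) : List Char :=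
  if i.toNat = 0 then ['0'] else aBinDigits i.toNat

def validBits (num : Int) (limit : Int) : List String :=
  (PySem.List.pyRange 0 limit 1).foldl (fun temp i =>
    if limit = 60 then
      (if ((aBin i).count '1' : Int) = num then
        (if i < 10 then temp ++ ["0" ++ PySem.Int.toStr i] else temp ++ [PySem.Int.toStr i])
       else temp)
    else
      (if ((aBin i).count '1' : Int) = num then temp ++ [PySem.Int.toStr i] else temp)) []

-- ===== PORT B =====
-- Source B's gen(bits, k): values < 2^bits with exactly k one-bits, increasing
def altGen (bits : Nat) (k : Int) : List Nat :=
  if k < 0 ∨ (bits : Int) < k then []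
  else if k = 0 then [0]
  else match bits with
    | 0 => []
    | b + 1 => altGen b k ++ (altGen b (k - 1)).map (fun v => v + 2 ^ b)
termination_by bits

def validBits_alt (num : Int) (limit : Int) : List String :=
  ((altGen (Nat.size limit.natAbs) num).filter (fun (v : Nat) => (v : Int) < limit)).map
    (fun (v : Nat) => if limit = 60 ∧ (v : Int) < 10
              then "0" ++ PySem.Int.toStr (v : Int) else PySem.Int.toStr (v : Int))

-- ===== PRECONDITION & SPEC =====
def Spec_validBits (num : Int) (limit : Int) (out : List String) : Prop := out = validBits_alt num limit
instance (num : Int) (limit : Int) (out : List String) : Decidable (Spec_validBits num limit out) := by unfold Spec_validBits; infer_instance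

-- ===== CLAIM (what is proved, stated in full; the proofs are below) =====
def Claim_equal_validBits : Prop := ∀ (num : Int) (limit : Int), Dom_validBits num limit → Spec_validBits num limit (validBits num limit)

-- ===== LEMMAS AND PROOFS =====

-- proof-side popcount
def pc (n : Nat) : Nat :=
  if h : n = 0 then 0 else n % 2 + pc (n / 2)
decreasing_by exact Nat.div_lt_self (Nat.pos_of_ne_zero h) (by norm_num)

theorem pc_zero : pc 0 = 0 := by unfold pc; simp

theorem count_aBinDigits (n : Nat) : (aBinDigits n).count '1' = pc n := by
  induction n using Nat.strong_induction_on with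
  | _ n ih =>
    unfold aBinDigits pc
    by_cases h : n = 0
    · simp [h]
    · have := ih (n / 2) (Nat.div_lt_self (Nat.pos_of_ne_zero h) (by norm_num))
      simp only [h, dif_neg, not_false_iff]
      rw [List.count_append, this]
      rcases Nat.mod_two_eq_zero_or_one n with h2 | h2 <;> simp [h2, List.count_singleton] <;> omega

theorem count_aBin (n : Nat) : (aBin (n : Int)).count '1' = pc n := by
  unfold aBin
  by_cases h : n = 0
  · simp [h, pc_zero, List.count_singleton]
  · simp [h, count_aBinDigits]

theorem pc_le_of_lt (b : Nat) : ∀ n < 2 ^ b, pc n ≤ b := by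
  induction b with
  | zero =>
    intro n hn
    norm_num at hn
    subst hn; simp [pc_zero]
  | succ b ih =>
    intro n hn
    by_cases h : n = 0
    · simp [h, pc_zero]
    · have hd : n / 2 < 2 ^ b := by
        have h2 : 2 ^ (b + 1) = 2 * 2 ^ b := by ring
        omega
      have := ih (n / 2) hd
      rw [pc, dif_neg h]
      omega

theorem pc_add_pow (b : Nat) : ∀ n < 2 ^ b, pc (2 ^ b + n) = pc n + 1 := by
  induction b with
  | zero =>
    intro n hn
    norm_num at hn
    subst hn
    show pc 1 = pc 0 + 1
    rw [pc]; simp [pc_zero]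
  | succ b ih =>
    intro n hn
    have hpow : 2 ^ (b + 1) = 2 * 2 ^ b := by ring
    have hne : 2 ^ (b + 1) + n ≠ 0 := by positivity
    have hmod : (2 ^ (b + 1) + n) % 2 = n % 2 := by omega
    have hdiv : (2 ^ (b + 1) + n) / 2 = 2 ^ b + n / 2 := by omega
    have hlt : n / 2 < 2 ^ b := by omega
    conv_lhs => rw [pc]
    rw [dif_neg hne, hmod, hdiv, ih _ hlt]
    by_cases h : n = 0
    · simp [h, pc_zero]
    · conv_rhs => rw [pc]
      rw [dif_neg h]; omega

theorem altGen_zero (b : Nat) : altGen b 0 = [0] := by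
  rw [altGen.eq_def]; simp

theorem altGen_eq (b : Nat) : ∀ m : Nat,
    altGen b (m : Int) = (List.range (2 ^ b)).filter (fun n => pc n = m) := by
  induction b with
  | zero =>
    intro m
    rcases Nat.eq_zero_or_pos m with h | h
    · subst h
      rw [show ((0 : Nat) : Int) = 0 from rfl, altGen_zero]
      simp [List.range_one, pc_zero]
    · have h0 : ((0 : Nat) : Int) < (m : Int) := by exact_mod_cast h
      rw [altGen, if_pos (Or.inr h0)]
      have hm : pc 0 ≠ m := by rw [pc_zero]; omega
      simp [List.range_one, hm]
  | succ b ih =>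
    intro m
    have hsplit : List.range (2 ^ (b + 1)) =
        List.range (2 ^ b) ++ (List.range (2 ^ b)).map (fun n => 2 ^ b + n) := by
      have h2 : 2 ^ (b + 1) = 2 ^ b + 2 ^ b := by ring
      rw [h2, List.range_add]
    by_cases hbig : b + 1 < m
    · have h1 : ((b + 1 : Nat) : Int) < (m : Int) := by exact_mod_cast hbig
      rw [altGen.eq_def]
      rw [if_pos (Or.inr h1)]
      symm
      rw [List.filter_eq_nil_iff]
      intro n hn
      simp only [List.mem_range] at hn
      have := pc_le_of_lt (b + 1) n hn
      simp only [decide_eq_true_eq]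
      omega
    · rcases Nat.eq_zero_or_pos m with hm | hm
      · subst hm
        rw [show ((0 : Nat) : Int) = 0 from rfl, altGen_zero, hsplit, List.filter_append]
        have h1 : (List.range (2 ^ b)).filter (fun n => decide (pc n = 0)) = [0] := by
          have := ih 0
          rw [show ((0 : Nat) : Int) = 0 from rfl, altGen_zero] at this
          exact this.symm
        have h2 : ((List.range (2 ^ b)).map (fun n => 2 ^ b + n)).filter
            (fun n => decide (pc n = 0)) = [] := by
          rw [List.filter_eq_nil_iff]
          intro x hx
          simp only [List.mem_map, List.mem_range] at hx
          obtain ⟨n, hn, rfl⟩ := hx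
          simp [pc_add_pow b n hn]
        rw [h1, h2]
        simp
      · -- 1 ≤ m ≤ b + 1
        have hnotneg : ¬ ((m : Int) < 0 ∨ ((b + 1 : Nat) : Int) < (m : Int)) := by
          push Not
          constructor
          · exact_mod_cast Nat.zero_le m
          · exact_mod_cast Nat.not_lt.mp hbig
      -- unfold one step of altGen
        rw [altGen.eq_def, if_neg (by exact_mod_cast hnotneg),
            if_neg (by exact_mod_cast (by omega : ¬ ((m : Int) = 0)))]
        have hm1 : ((m : Int) - 1) = ((m - 1 : Nat) : Int) := by omega
        rw [hm1]
        show altGen b (m : Int) ++ List.map (fun v => v + 2 ^ b) (altGen b ((m - 1 : Nat) : Int)) =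
            List.filter (fun n => decide (pc n = m)) (List.range (2 ^ (b + 1)))
        rw [ih m, ih (m - 1), hsplit, List.filter_append]
        congr 1
        rw [List.filter_map]
        have hcongr : (List.range (2 ^ b)).filter ((fun n => decide (pc n = m)) ∘ (fun n => 2 ^ b + n)) =
            (List.range (2 ^ b)).filter (fun n => decide (pc n = m - 1)) := by
          apply List.filter_congr
          intro x hx
          simp only [List.mem_range] at hx
          simp only [Function.comp_apply, pc_add_pow b x hx, decide_eq_decide]
          omega
        rw [hcongr]
        apply List.map_congr_left
        intro x _
        omega

-- formatting rule shared by both sides (proof-side abbreviation)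
def fmtInt (limit i : Int) : String :=
  if limit = 60 ∧ i < 10 then "0" ++ PySem.Int.toStr i else PySem.Int.toStr i

theorem validBits_eq (num limit : Int) :
    validBits num limit =
      ((List.range limit.toNat).filter (fun n => decide ((pc n : Int) = num))).map
        (fun (n : Nat) => fmtInt limit (n : Int)) := by
  unfold validBits
  have hfun : (fun (temp : List String) (i : Int) =>
      if limit = 60 then
        (if ((aBin i).count '1' : Int) = num then
          (if i < 10 then temp ++ ["0" ++ PySem.Int.toStr i] else temp ++ [PySem.Int.toStr i])
         else temp)
      else
        (if ((aBin i).count '1' : Int) = num then temp ++ [PySem.Int.toStr i] else temp)) =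
      (fun temp i =>
        if (fun j => decide (((aBin j).count '1' : Int) = num)) i then temp ++ [fmtInt limit i]
        else temp) := by
    funext temp i
    by_cases h60 : limit = 60 <;> by_cases hc : ((aBin i).count '1' : Int) = num <;>
      by_cases hi : i < 10 <;> simp [fmtInt, h60, hc, hi]
  rw [hfun, PySem.List.foldl_append_if, List.nil_append, PySem.List.pyRange_one]
  have hz : (limit - 0).toNat = limit.toNat := by omega
  rw [hz, List.filter_map, List.map_map]
  simp only [Function.comp_def, Int.zero_add, count_aBin]

theorem altB_eq (num limit : Int) :
    validBits_alt num limit =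
      ((altGen (Nat.size limit.natAbs) num).filter (fun (v : Nat) => decide ((v : Int) < limit))).map
        (fun (v : Nat) => fmtInt limit (v : Int)) := by
  unfold validBits_alt fmtInt
  rfl

-- ===== VERDICT (by name: the statement is the Claim_ definition above) =====
theorem validBits_spec : Claim_equal_validBits := by
  intro num limit _
  unfold Spec_validBits
  rw [validBits_eq, altB_eq]
  by_cases hneg : num < 0
  · have hA : (List.range limit.toNat).filter (fun n => decide ((pc n : Int) = num)) = [] := by
      rw [List.filter_eq_nil_iff]
      intro n _
      simp only [decide_eq_true_eq]
      omega
    have hB : altGen (Nat.size limit.natAbs) num = [] := by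
      rw [altGen.eq_def, if_pos (Or.inl hneg)]
    rw [hA, hB]
    simp
  · obtain ⟨m, rfl⟩ : ∃ m : Nat, num = (m : Int) := ⟨num.toNat, by omega⟩
    by_cases hL : limit ≤ 0
    · have h0 : limit.toNat = 0 := by omega
      have hB : (altGen (Nat.size limit.natAbs) (m : Int)).filter
          (fun (v : Nat) => decide ((v : Int) < limit)) = [] := by
        rw [List.filter_eq_nil_iff]
        intro v _
        simp only [decide_eq_true_eq]
        omega
      rw [h0, hB]
      simp
    · have hpos : 0 < limit := by omega
      have habs : limit.natAbs = limit.toNat := by omega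
      have hcastL : ((limit.toNat : Int)) = limit := by omega
      rw [habs, altGen_eq]
      have hLe : limit.toNat ≤ 2 ^ Nat.size limit.toNat := le_of_lt (Nat.lt_size_self _)
      have key : ((List.range (2 ^ Nat.size limit.toNat)).filter (fun n => decide (pc n = m))).filter
          (fun (v : Nat) => decide ((v : Int) < limit)) =
          (List.range limit.toNat).filter (fun n => decide (pc n = m)) := by
        rw [List.filter_filter]
        have hsplit : List.range (2 ^ Nat.size limit.toNat) =
            List.range limit.toNat ++
              (List.range (2 ^ Nat.size limit.toNat - limit.toNat)).map (fun n => limit.toNat + n) := by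
          conv_lhs => rw [show 2 ^ Nat.size limit.toNat =
            limit.toNat + (2 ^ Nat.size limit.toNat - limit.toNat) by omega]
          rw [List.range_add]
        rw [hsplit, List.filter_append]
        have h2 : ((List.range (2 ^ Nat.size limit.toNat - limit.toNat)).map
            (fun n => limit.toNat + n)).filter
            (fun (a : Nat) => decide ((a : Int) < limit) && decide (pc a = m)) = [] := by
          rw [List.filter_eq_nil_iff]
          intro x hx
          simp only [List.mem_map] at hx
          obtain ⟨n, _, rfl⟩ := hx
          simp only [Bool.and_eq_true, decide_eq_true_eq, not_and]
          intro h
          exact absurd h (by omega)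
        have h1 : (List.range limit.toNat).filter
            (fun (a : Nat) => decide ((a : Int) < limit) && decide (pc a = m)) =
            (List.range limit.toNat).filter (fun n => decide (pc n = m)) := by
          apply List.filter_congr
          intro x hx
          simp only [List.mem_range] at hx
          have : (x : Int) < limit := by omega
          simp [this]
        rw [h2, h1, List.append_nil]
      rw [key]
      have hpred : (List.range limit.toNat).filter (fun n => decide ((pc n : Int) = (m : Int))) =
          (List.range limit.toNat).filter (fun n => decide (pc n = m)) := by
        apply List.filter_congr
        intro x _
        simp
      rw [hpred]
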